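-- pv_equiv track=rewrite | github.com/rixyn/hyperskill-python-core | learning_progress_tracker/stage4.py | find_most_and_least_popular
-- ===== SOURCE A (Python) =====
-- def find_most_and_least_popular(enrollment_stats):
--     max_enrollment = max(enrollment_stats.values(), default=0)
--     min_enrollment = min(enrollment_stats.values(), default=0)
--
--     most_popular = [course for course,
--                     count in enrollment_stats.items() if count == max_enrollment]
--     least_popular = [course for course,
--                      count in enrollment_stats.items() if count == min_enrollment]
--
--     return most_popular, least_popular
-- ===== SOURCE B (Python) =====
-- def find_most_and_least_popular(enrollment_stats):
--     max_enrollment = None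
--     min_enrollment = None
--     most_popular = []
--     least_popular = []
--     for course, count in enrollment_stats.items():
--         if max_enrollment is None or count > max_enrollment:
--             max_enrollment = count
--             most_popular = [course]
--         elif count == max_enrollment:
--             most_popular.append(course)
--         if min_enrollment is None or count < min_enrollment:
--             min_enrollment = count
--             least_popular = [course]
--         elif count == min_enrollment:
--             least_popular.append(course)
--     return most_popular, least_popular
-- ===== Notes on version B (the rewrite author's own statement) =====
-- stated objective: alternative
-- what changed: Replaces A's four separate passes (max over values, min over values, two filtering comprehensions) by one single loop that maintains the running max/min together with the current lists of extremal courses.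
import Mathlib
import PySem

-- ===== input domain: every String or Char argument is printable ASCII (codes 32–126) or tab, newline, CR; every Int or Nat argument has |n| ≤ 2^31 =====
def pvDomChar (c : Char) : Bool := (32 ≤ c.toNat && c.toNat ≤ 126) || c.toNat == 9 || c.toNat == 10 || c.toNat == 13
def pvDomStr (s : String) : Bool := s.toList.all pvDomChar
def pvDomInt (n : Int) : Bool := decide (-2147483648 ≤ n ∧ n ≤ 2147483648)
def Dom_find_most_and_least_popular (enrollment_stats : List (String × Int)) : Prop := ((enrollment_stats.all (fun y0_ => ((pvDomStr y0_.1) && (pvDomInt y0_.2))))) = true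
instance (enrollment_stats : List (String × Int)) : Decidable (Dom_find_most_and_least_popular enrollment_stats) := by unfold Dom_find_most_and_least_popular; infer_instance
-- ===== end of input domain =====

-- B replaces A's four passes (max, min, two filtering comprehensions) by one single
-- loop maintaining the running extremes together with their course lists (alternative
-- decomposition, same asymptotic cost).

-- ===== PORT A =====
def find_most_and_least_popular (enrollment_stats : List (String × Int)) : List String × List String :=
  let values := enrollment_stats.map Prod.snd
  let max_enrollment := (PySem.List.max? values (fun x => x)).getD 0
  let min_enrollment := (PySem.List.min? values (fun x => x)).getD 0
  let most_popular := (enrollment_stats.filter (fun p => p.2 == max_enrollment)).map Prod.fst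
  let least_popular := (enrollment_stats.filter (fun p => p.2 == min_enrollment)).map Prod.fst
  (most_popular, least_popular)

-- ===== PORT B =====
-- the single loop of Source B, threading (max_enrollment, most_popular, min_enrollment, least_popular)
def fmlpLoop : List (String × Int) → Option Int → List String → Option Int → List String →
    List String × List String
  | [], _, most, _, least => (most, least)
  | (c, n) :: t, mx, most, mn, least =>
    let s1 : Option Int × List String :=
      match mx with
      | none => (some n, [c])
      | some m => if n > m then (some n, [c]) else if n == m then (some m, most ++ [c]) else (some m, most)
    let s2 : Option Int × List String :=
      match mn with
      | none => (some n, [c])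
      | some m => if n < m then (some n, [c]) else if n == m then (some m, least ++ [c]) else (some m, least)
    fmlpLoop t s1.1 s1.2 s2.1 s2.2

def find_most_and_least_popular_alt (enrollment_stats : List (String × Int)) : List String × List String :=
  fmlpLoop enrollment_stats none [] none []

-- ===== PRECONDITION & SPEC =====
def Spec_find_most_and_least_popular (enrollment_stats : List (String × Int)) (out : List String × List String) : Prop := out = find_most_and_least_popular_alt enrollment_stats
instance (enrollment_stats : List (String × Int)) (out : List String × List String) : Decidable (Spec_find_most_and_least_popular enrollment_stats out) := by unfold Spec_find_most_and_least_popular; infer_instance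

-- ===== CLAIM (what is proved, stated in full; the proofs are below) =====
def Claim_equal_find_most_and_least_popular : Prop := ∀ (enrollment_stats : List (String × Int)), Dom_find_most_and_least_popular enrollment_stats → Spec_find_most_and_least_popular enrollment_stats (find_most_and_least_popular enrollment_stats)

-- ===== LEMMAS AND PROOFS =====

-- proof-side projections of the single loop: the max half and the min half
def fmlpMax : List (String × Int) → Option Int × List String → Option Int × List String
  | [], s => s
  | (c, n) :: t, (mx, most) =>
    fmlpMax t
      (match mx with
       | none => (some n, [c])
       | some m => if n > m then (some n, [c]) else if n == m then (some m, most ++ [c]) else (some m, most))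

def fmlpMin : List (String × Int) → Option Int × List String → Option Int × List String
  | [], s => s
  | (c, n) :: t, (mn, least) =>
    fmlpMin t
      (match mn with
       | none => (some n, [c])
       | some m => if n < m then (some n, [c]) else if n == m then (some m, least ++ [c]) else (some m, least))

theorem fmlpLoop_split : ∀ (l : List (String × Int)) (mx : Option Int) (most : List String)
    (mn : Option Int) (least : List String),
    fmlpLoop l mx most mn least = ((fmlpMax l (mx, most)).2, (fmlpMin l (mn, least)).2) := by
  intro l
  induction l with
  | nil => intro mx most mn least; rfl
  | cons p t ih =>
    intro mx most mn least
    obtain ⟨c, n⟩ := p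
    simp only [fmlpLoop, fmlpMax, fmlpMin]
    exact ih _ _ _ _

theorem fmlpMax_some : ∀ (l : List (String × Int)) (m : Int) (most : List String),
    fmlpMax l (some m, most) =
      (some (l.foldl (fun a p => max a p.2) m),
       (if l.foldl (fun a p => max a p.2) m = m then most else [])
         ++ (l.filter (fun p => p.2 == l.foldl (fun a p => max a p.2) m)).map Prod.fst) := by
  intro l
  induction l with
  | nil => intro m most; simp [fmlpMax]
  | cons p t ih =>
    intro m most
    obtain ⟨c, n⟩ := p
    have hM := (PySem.List.le_foldl_max_int t Prod.snd (max m n)).1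
    simp only [List.foldl_cons]
    by_cases h1 : n > m
    · have hmax : max m n = n := by omega
      simp only [fmlpMax, if_pos h1, hmax]
      rw [ih n [c]]
      rw [hmax] at hM
      have hMm : t.foldl (fun a p => max a p.2) n ≠ m := by omega
      have hne : n ≠ m := by omega
      by_cases h2 : t.foldl (fun a p => max a p.2) n = n
      · simp [List.filter_cons, h2, hMm, hne]
      · have : ¬ (n == t.foldl (fun a p => max a p.2) n) = true := by
          simp; omega
        simp [List.filter_cons, h2, hMm, this]
    · have hmax : max m n = m := by omega
      by_cases h2 : n = m
      · simp only [fmlpMax, if_neg h1, if_pos (by simp [h2] : (n == m) = true), hmax]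
        rw [ih m (most ++ [c])]
        by_cases h3 : t.foldl (fun a p => max a p.2) m = m
        · have : (n == t.foldl (fun a p => max a p.2) m) = true := by simp [h2, h3]
          simp [List.filter_cons, h3, this, h2]
        · have : ¬ (n == t.foldl (fun a p => max a p.2) m) = true := by
            simp [h2]; omega
          simp [List.filter_cons, h3, this]
      · simp only [fmlpMax, if_neg h1, if_neg (by simp [h2] : ¬ (n == m) = true), hmax]
        rw [ih m most]
        rw [hmax] at hM
        have : ¬ (n == t.foldl (fun a p => max a p.2) m) = true := by
          simp; omega
        simp [List.filter_cons, this]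

theorem fmlpMin_some : ∀ (l : List (String × Int)) (m : Int) (least : List String),
    fmlpMin l (some m, least) =
      (some (l.foldl (fun a p => min a p.2) m),
       (if l.foldl (fun a p => min a p.2) m = m then least else [])
         ++ (l.filter (fun p => p.2 == l.foldl (fun a p => min a p.2) m)).map Prod.fst) := by
  intro l
  induction l with
  | nil => intro m least; simp [fmlpMin]
  | cons p t ih =>
    intro m least
    obtain ⟨c, n⟩ := p
    have hM := (PySem.List.le_foldl_max_int t (fun p => -p.2) (max (-m) (-n))).1
    have hfold : ∀ (a : Int) (u : List (String × Int)),
        u.foldl (fun a p => min a p.2) a = - u.foldl (fun b p => max b (-p.2)) (-a) := by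
      intro a u
      induction u generalizing a with
      | nil => simp
      | cons q r ihr =>
        simp only [List.foldl_cons, ihr]
        have hmn : -(min a q.2) = max (-a) (-q.2) := by omega
        rw [hmn]
    simp only [List.foldl_cons]
    by_cases h1 : n < m
    · have hmax : min m n = n := by omega
      simp only [fmlpMin, if_pos h1, hmax]
      rw [ih n [c]]
      have hMn : t.foldl (fun a p => min a p.2) n ≤ n := by
        rw [hfold]
        have := (PySem.List.le_foldl_max_int t (fun p => -p.2) (-n)).1
        omega
      have hMm : t.foldl (fun a p => min a p.2) n ≠ m := by omega
      have hne : n ≠ m := by omega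
      by_cases h2 : t.foldl (fun a p => min a p.2) n = n
      · simp [List.filter_cons, h2, hMm, hne]
      · have : ¬ (n == t.foldl (fun a p => min a p.2) n) = true := by
          simp; omega
        simp [List.filter_cons, h2, hMm, this]
    · have hmax : min m n = m := by omega
      have hMle : t.foldl (fun a p => min a p.2) m ≤ m := by
        rw [hfold]
        have := (PySem.List.le_foldl_max_int t (fun p => -p.2) (-m)).1
        omega
      by_cases h2 : n = m
      · simp only [fmlpMin, if_neg h1, if_pos (by simp [h2] : (n == m) = true), hmax]
        rw [ih m (least ++ [c])]
        by_cases h3 : t.foldl (fun a p => min a p.2) m = m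
        · have : (n == t.foldl (fun a p => min a p.2) m) = true := by simp [h2, h3]
          simp [List.filter_cons, h3, this, h2]
        · have : ¬ (n == t.foldl (fun a p => min a p.2) m) = true := by
            simp [h2]; omega
          simp [List.filter_cons, h3, this]
      · simp only [fmlpMin, if_neg h1, if_neg (by simp [h2] : ¬ (n == m) = true), hmax]
        rw [ih m least]
        have : ¬ (n == t.foldl (fun a p => min a p.2) m) = true := by
          simp; omega
        simp [List.filter_cons, this]

-- ===== VERDICT (by name: the statement is the Claim_ definition above) =====
theorem find_most_and_least_popular_spec : Claim_equal_find_most_and_least_popular := by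
  unfold Claim_equal_find_most_and_least_popular
  intro es _
  unfold Spec_find_most_and_least_popular find_most_and_least_popular find_most_and_least_popular_alt
  cases es with
  | nil => rfl
  | cons p t =>
    obtain ⟨c, n⟩ := p
    rw [fmlpLoop_split]
    simp only [fmlpMax, fmlpMin, List.map_cons]
    rw [fmlpMax_some, fmlpMin_some]
    rw [PySem.List.max?_id_cons, PySem.List.min?_id_cons]
    simp only [Option.getD_some, List.foldl_map]
    have hMax := (PySem.List.le_foldl_max_int t Prod.snd n).1
    simp only [Prod.mk.injEq]
    refine ⟨?_, ?_⟩
    · by_cases h : t.foldl (fun a p => max a p.2) n = n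
      · simp [List.filter_cons, h]
      · have : ¬ (n == t.foldl (fun a p => max a p.2) n) = true := by
          simp; omega
        simp [List.filter_cons, h, this]
    · have hfold : ∀ (a : Int) (u : List (String × Int)),
          u.foldl (fun a p => min a p.2) a = - u.foldl (fun b p => max b (-p.2)) (-a) := by
        intro a u
        induction u generalizing a with
        | nil => simp
        | cons q r ihr =>
        simp only [List.foldl_cons, ihr]
        have hmn : -(min a q.2) = max (-a) (-q.2) := by omega
        rw [hmn]
      have hMin : t.foldl (fun a p => min a p.2) n ≤ n := by
        rw [hfold]
        have := (PySem.List.le_foldl_max_int t (fun p => -p.2) (-n)).1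
        omega
      by_cases h : t.foldl (fun a p => min a p.2) n = n
      · simp [List.filter_cons, h]
      · have : ¬ (n == t.foldl (fun a p => min a p.2) n) = true := by
          simp; omega
        simp [List.filter_cons, h, this]
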